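-- pv_equiv track=rewrite | github.com/ggmeiner22/Dancing-Links | organpipe.py | organ_pipe_order
-- ===== SOURCE A (Python) =====
-- def organ_pipe_order(n):
--     """
--     Generate an "organ-pipe" ordering of indices [0..n-1], starting from the center
--     and alternately adding indices to the left and right.
--
--     This heuristic often balances constraint coverage in DLX searches.
--
--     Args:
--         n (int): Length of the sequence.
--
--     Returns:
--         list[int]: Indices in center-out order.
--     """
--     # Determine center positions
--     center = n // 2
--     left = center - 1
--     right = center + (n % 2)
--     order = [center] if n % 2 else []
--
--     # Expand outwards alternately to left and right
--     while left >= 0 or right < n: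
--         if left >= 0:
--             order.append(left)
--             left -= 1
--         if right < n:
--             order.append(right)
--             right += 1
--     return order
-- ===== SOURCE B (Python) =====
-- def organ_pipe_order(n):
--     """Organ-pipe ordering by direct placement: compute each index's
--     final position with a closed-form formula and scatter into a
--     preallocated list (inverse-permutation construction)."""
--     c, odd = divmod(n, 2)
--     out = [0] * n
--     for i in range(n):
--         if i < c:
--             out[2 * (c - i) - 2 + odd] = i
--         else:
--             out[2 * (i - c) + 1 - odd] = i
--     return out
-- ===== Notes on version B (the rewrite author's own statement) =====
-- stated objective: alternative
-- what changed: Replaces A's incremental two-cursor center-out expansion loop with direct placement: a closed-form formula gives each index its final position and a single pass scatters indices into a preallocated list (inverse-permutation construction).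
-- intended difference: For negative odd n A returns the garbage singleton [n//2] (leftover loop initialisation), while B returns [], the intended empty ordering for a non-positive length. — e.g. on organ_pipe_order(-1): A returns [-1], B returns []
import Mathlib
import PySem

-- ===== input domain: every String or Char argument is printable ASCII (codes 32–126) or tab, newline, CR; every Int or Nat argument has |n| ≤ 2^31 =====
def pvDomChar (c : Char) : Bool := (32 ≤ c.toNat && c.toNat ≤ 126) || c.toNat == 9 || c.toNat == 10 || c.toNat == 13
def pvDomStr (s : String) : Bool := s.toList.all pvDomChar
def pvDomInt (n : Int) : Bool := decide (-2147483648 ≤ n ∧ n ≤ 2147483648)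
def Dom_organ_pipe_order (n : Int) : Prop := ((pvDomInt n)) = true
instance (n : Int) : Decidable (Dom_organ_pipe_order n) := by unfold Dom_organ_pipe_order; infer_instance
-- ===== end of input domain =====

-- B replaces A's incremental two-cursor center-out expansion by direct placement: a
-- closed-form formula gives each index its final position and one pass scatters the
-- indices into a preallocated list; same O(n) cost, different algorithm.

-- ===== PORT A =====
-- the 'while left >= 0 or right < n' loop of A, step for step
def opLoopA (n left right : Int) (order : List Int) : List Int :=
  if 0 ≤ left ∨ right < n then
    if 0 ≤ left then
      if right < n then opLoopA n (left - 1) (right + 1) ((order ++ [left]) ++ [right])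
      else opLoopA n (left - 1) right (order ++ [left])
    else
      if right < n then opLoopA n left (right + 1) (order ++ [right])
      else order  -- unreachable: loop condition held but neither branch fired
  else order
termination_by (left + 1).toNat + (n - right).toNat
decreasing_by all_goals omega

def organ_pipe_order (n : Int) : List Int :=
  let center := PySem.Int.floordiv n 2
  let left := center - 1
  let right := center + PySem.Int.mod n 2
  let order := if PySem.Int.mod n 2 ≠ 0 then [center] else []
  opLoopA n left right order

-- ===== PORT B =====
-- 'out[p] = i' is PySem.List.pySetD: exact here, the computed position is always in
-- range when the loop body runs (proved in the lemmas below).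
def organ_pipe_order_alt (n : Int) : List Int :=
  let c := PySem.Int.floordiv n 2
  let odd := PySem.Int.mod n 2
  let out := List.replicate n.toNat (0 : Int)
  (PySem.List.pyRange 0 n 1).foldl
    (fun out i =>
      if i < c then PySem.List.pySetD out (2 * (c - i) - 2 + odd) i
      else PySem.List.pySetD out (2 * (i - c) + 1 - odd) i) out

-- ===== PRECONDITION & SPEC =====
-- For negative odd n, A returns the garbage singleton [n//2] (leftover loop
-- initialisation), while B returns [], the intended empty ordering for a
-- non-positive length.
def D_organ_pipe_order (n : Int) : Prop := n < 0 ∧ n % 2 = 1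
instance (n : Int) : Decidable (D_organ_pipe_order n) := by unfold D_organ_pipe_order; infer_instance
def Spec_organ_pipe_order (n : Int) (out : List Int) : Prop := ¬ D_organ_pipe_order n → out = organ_pipe_order_alt n
instance (n : Int) (out : List Int) : Decidable (Spec_organ_pipe_order n out) := by unfold Spec_organ_pipe_order; infer_instance
def pvDiffWitness_organ_pipe_order : Int := (-1)
def pvDiffWitnessOut_organ_pipe_order : (List Int) × (List Int) := ([-1], [])

-- ===== CLAIM (what is proved, stated in full; the proofs are below) =====
def Claim_unchanged_organ_pipe_order : Prop := ∀ (n : Int), Dom_organ_pipe_order n → Spec_organ_pipe_order n (organ_pipe_order n)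
def Claim_changed_organ_pipe_order : Prop := Dom_organ_pipe_order (pvDiffWitness_organ_pipe_order) ∧ D_organ_pipe_order (pvDiffWitness_organ_pipe_order) ∧ organ_pipe_order (pvDiffWitness_organ_pipe_order) = pvDiffWitnessOut_organ_pipe_order.1 ∧ organ_pipe_order_alt (pvDiffWitness_organ_pipe_order) = pvDiffWitnessOut_organ_pipe_order.2 ∧ pvDiffWitnessOut_organ_pipe_order.1 ≠ pvDiffWitnessOut_organ_pipe_order.2
def Claim_exact_organ_pipe_order : Prop := ∀ (n : Int), Dom_organ_pipe_order n → D_organ_pipe_order n → organ_pipe_order n ≠ organ_pipe_order_alt n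

-- ===== LEMMAS AND PROOFS =====

-- the value sitting at position p of the organ-pipe order of length 2c+o (o ∈ {0,1})
def invNat (c : Int) (o : Nat) (p : Nat) : Int :=
  if p % 2 = o then c - ((p + 2 - o) / 2 : Nat) else c + ((p / 2 : Nat) : Int)

-- the position B's loop writes index i to
def posB (c o : Int) (i : Int) : Int :=
  if i < c then 2 * (c - i) - 2 + o else 2 * (i - c) + 1 - o

-- ===== A side: the loop produces the interleaving of the two ranges =====
theorem opLoopA_balanced (n : Int) : ∀ (k : Nat) (L R : Int) (order : List Int),
    L + 1 = n - R → (L + 1).toNat = k →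
    opLoopA n L R order =
      order ++ ((PySem.List.pyRange L (-1) (-1)).zip (PySem.List.pyRange R n 1)).flatMap
        (fun p => [p.1, p.2]) := by
  intro k
  induction k with
  | zero =>
    intro L R order hbal hk
    have hL : L < 0 := by omega
    have hR : n ≤ R := by omega
    rw [opLoopA]
    rw [PySem.List.pyRange_neg_one_eq_nil (by omega : L ≤ -1)]
    simp [hL.not_ge, hR.not_gt]
  | succ k ih =>
    intro L R order hbal hk
    have hL : 0 ≤ L := by omega
    have hR : R < n := by omega
    rw [opLoopA]
    simp only [hL, hR, if_pos, or_true]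
    rw [ih (L - 1) (R + 1) _ (by omega) (by omega)]
    rw [PySem.List.pyRange_neg_one_cons (by omega : (-1 : Int) < L),
        PySem.List.pyRange_one_cons hR]
    simp [List.zip_cons_cons]

-- ===== the interleaving IS the map of invNat over the positions =====
theorem interleave_eq (c : Int) (o : Nat) (ho : o < 2) : ∀ j : Nat,
    (if o = 1 then [c] else []) ++
      (List.range j).flatMap (fun k : Nat => [c - 1 - (k : Int), c + (o : Int) + (k : Int)]) =
    (List.range (o + 2 * j)).map (invNat c o) := by
  intro j
  induction j with
  | zero =>
    interval_cases o <;> simp [invNat]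
  | succ j ih =>
    have h1 : o + 2 * (j + 1) = (o + 2 * j + 1) + 1 := by omega
    rw [h1, List.range_succ, List.range_succ, List.range_succ, List.map_append,
        List.map_append, List.flatMap_append, ← List.append_assoc, ih]
    have e1 : invNat c o (o + 2 * j) = c - 1 - (j : Int) := by
      unfold invNat
      rw [if_pos (by omega)]
      have : (o + 2 * j + 2 - o) / 2 = j + 1 := by omega
      rw [this]; push_cast; ring
    have e2 : invNat c o (o + 2 * j + 1) = c + o + j := by
      unfold invNat
      rw [if_neg (by omega)]
      have : (o + 2 * j + 1) / 2 = j + (o + 1) / 2 := by omega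
      rw [this]
      interval_cases o <;> (push_cast; ring)
    simp [e1, e2]

-- ===== B side: a fold of writes at distinct positions, read back pointwise =====
theorem scatter_length (pos : Int → Int) : ∀ (l : List Int) (init : List Int),
    (l.foldl (fun out i => PySem.List.pySetD out (pos i) i) init).length = init.length := by
  intro l
  induction l with
  | nil => intro init; rfl
  | cons a t ih =>
    intro init
    rw [List.foldl_cons, ih, PySem.List.length_pySetD]

theorem scatter_untouched (pos : Int → Int) : ∀ (l : List Int) (init : List Int) (p : Nat),
    (∀ i ∈ l, 0 ≤ pos i) → (∀ i ∈ l, pos i ≠ (p : Int)) →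
    (l.foldl (fun out i => PySem.List.pySetD out (pos i) i) init)[p]? = init[p]? := by
  intro l
  induction l with
  | nil => intro init p _ _; rfl
  | cons a t ih =>
    intro init p h0 hne
    rw [List.foldl_cons, ih _ p (fun i hi => h0 i (List.mem_cons_of_mem a hi))
          (fun i hi => hne i (List.mem_cons_of_mem a hi))]
    rw [PySem.List.pySetD_of_nonneg _ _ (h0 a List.mem_cons_self)]
    have hpa : (pos a).toNat ≠ p := by
      have h1 := h0 a List.mem_cons_self
      have h2 := hne a List.mem_cons_self
      omega
    rw [List.getElem?_set_ne hpa]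

theorem scatter_written (pos : Int → Int) : ∀ (l : List Int) (init : List Int) (p : Nat) (i0 : Int),
    (∀ i ∈ l, 0 ≤ pos i) → i0 ∈ l → pos i0 = (p : Int) →
    (∀ i ∈ l, pos i = (p : Int) → i = i0) → p < init.length →
    (l.foldl (fun out i => PySem.List.pySetD out (pos i) i) init)[p]? = some i0 := by
  intro l
  induction l with
  | nil => intro _ _ _ _ h; cases h
  | cons a t ih =>
    intro init p i0 h0 hmem hp huniq hlen
    rw [List.foldl_cons]
    by_cases hmt : i0 ∈ t
    · exact ih _ p i0 (fun i hi => h0 i (List.mem_cons_of_mem a hi)) hmt hp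
        (fun i hi => huniq i (List.mem_cons_of_mem a hi))
        (by rw [PySem.List.length_pySetD]; exact hlen)
    · have ha : a = i0 := by
        rcases List.mem_cons.mp hmem with h | h
        · exact h.symm
        · exact absurd h hmt
      subst ha
      rw [scatter_untouched pos t _ p (fun i hi => h0 i (List.mem_cons_of_mem a hi))
            (fun i hi hip => hmt (by rw [← huniq i (List.mem_cons_of_mem a hi) hip]; exact hi))]
      rw [PySem.List.pySetD_of_nonneg _ _ (h0 a List.mem_cons_self)]
      have hpn : (pos a).toNat = p := by
        have := h0 a List.mem_cons_self; omega
      rw [hpn] at *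
      rw [List.getElem?_set_self hlen]

-- B computes the map of invNat over the positions, for n ≥ 0
theorem alt_eq_map (n : Int) (hn : 0 ≤ n) :
    organ_pipe_order_alt n =
      (List.range n.toNat).map (invNat (PySem.Int.floordiv n 2) (PySem.Int.mod n 2).toNat) := by
  have hdm := PySem.Int.floordiv_mul_add_mod n 2
  have hm := PySem.Int.mod_two_eq n
  set c := PySem.Int.floordiv n 2 with hc
  set odd := PySem.Int.mod n 2 with ho
  have hon : odd = (odd.toNat : Int) := by omega
  unfold organ_pipe_order_alt
  dsimp only
  rw [← hc, ← ho]
  have hfun : (fun out i => if i < c then PySem.List.pySetD out (2 * (c - i) - 2 + odd) i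
                 else PySem.List.pySetD out (2 * (i - c) + 1 - odd) i) =
      (fun out i => PySem.List.pySetD out (posB c odd i) i) := by
    funext out i
    unfold posB
    split <;> rfl
  rw [hfun]
  apply List.ext_getElem?
  intro p
  by_cases hp : p < n.toNat
  · have hinv : invNat c odd.toNat p = if p % 2 = odd.toNat
        then c - ((p + 2 - odd.toNat) / 2 : Nat) else c + ((p / 2 : Nat) : Int) := rfl
    -- the unique index written at position p
    have key : posB c odd (invNat c odd.toNat p) = (p : Int) ∧
        0 ≤ invNat c odd.toNat p ∧ invNat c odd.toNat p < n := by
      rw [hinv]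
      unfold posB
      by_cases hpar : p % 2 = odd.toNat
      · rw [if_pos hpar]
        have hq : 2 * ((p + 2 - odd.toNat) / 2) = p + 2 - odd.toNat := by omega
        rw [if_pos (by omega)]
        refine ⟨by push_cast; omega, by push_cast; omega, by push_cast; omega⟩
      · rw [if_neg hpar]
        have hq : 2 * (p / 2) = p - p % 2 := by omega
        rw [if_neg (by push_cast; omega)]
        refine ⟨by push_cast; omega, by push_cast; omega, by push_cast; omega⟩
    rw [scatter_written (posB c odd) _ _ p (invNat c odd.toNat p)
          (by intro i hi
              rw [PySem.List.mem_pyRange_one] at hi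
              unfold posB; split <;> omega)
          (by rw [PySem.List.mem_pyRange_one]; exact ⟨key.2.1, key.2.2⟩)
          key.1
          (by intro i hi hip
              rw [PySem.List.mem_pyRange_one] at hi
              rw [hinv]
              unfold posB at hip
              by_cases hic : i < c
              · rw [if_pos hic] at hip
                rw [if_pos (by omega)]
                omega
              · rw [if_neg hic] at hip
                rw [if_neg (by omega)]
                omega)
          (by rw [List.length_replicate]; exact hp)]
    rw [List.getElem?_map, List.getElem?_range hp]
    rfl
  · have h1 : ((PySem.List.pyRange 0 n 1).foldl
        (fun out i => PySem.List.pySetD out (posB c odd i) i)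
        (List.replicate n.toNat 0)).length = n.toNat := by
      rw [scatter_length, List.length_replicate]
    rw [List.getElem?_eq_none, List.getElem?_eq_none]
    · simp only [List.length_map, List.length_range]; omega
    · rw [h1]; omega

-- A computes the same map, for n ≥ 0
theorem a_eq_map (n : Int) (hn : 0 ≤ n) :
    organ_pipe_order n =
      (List.range n.toNat).map (invNat (PySem.Int.floordiv n 2) (PySem.Int.mod n 2).toNat) := by
  have hdm := PySem.Int.floordiv_mul_add_mod n 2
  have hm := PySem.Int.mod_two_eq n
  set c := PySem.Int.floordiv n 2 with hc
  set odd := PySem.Int.mod n 2 with ho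
  have hc0 : 0 ≤ c := by omega
  unfold organ_pipe_order
  dsimp only
  rw [← hc, ← ho]
  rw [opLoopA_balanced n (c - 1 + 1).toNat (c - 1) (c + odd) _ (by omega) rfl]
  rw [PySem.List.pyRange_neg_one, PySem.List.pyRange_one]
  have hlen1 : (c - 1 - -1).toNat = c.toNat := by omega
  have hlen2 : (n - (c + odd)).toNat = c.toNat := by omega
  rw [hlen1, hlen2, List.zip_map', List.flatMap_map]
  have hpre : (if odd ≠ 0 then [c] else []) = (if odd.toNat = 1 then [c] else []) := by
    rcases hm with h | h <;> simp [h]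
  have hfl : (fun k : Nat => [c - 1 - (k : Int), c + odd + k]) =
      (fun k : Nat => [c - 1 - (k : Int), c + (odd.toNat : Int) + k]) := by
    funext k
    congr 2
    omega
  have hnn : n.toNat = odd.toNat + 2 * c.toNat := by omega
  rw [hpre, hnn]
  dsimp only
  rw [hfl]
  exact interleave_eq c odd.toNat (by omega) c.toNat

-- A at a negative n: the loop never runs
theorem a_neg (n : Int) (hn : n < 0) :
    organ_pipe_order n =
      (if PySem.Int.mod n 2 ≠ 0 then [PySem.Int.floordiv n 2] else []) := by
  have hdm := PySem.Int.floordiv_mul_add_mod n 2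
  have hm := PySem.Int.mod_two_eq n
  set c := PySem.Int.floordiv n 2 with hc
  set odd := PySem.Int.mod n 2 with ho
  unfold organ_pipe_order
  dsimp only
  rw [← hc, ← ho, opLoopA]
  rw [if_neg (by omega : ¬(0 ≤ c - 1 ∨ c + odd < n))]

theorem alt_neg (n : Int) (hn : n < 0) : organ_pipe_order_alt n = [] := by
  unfold organ_pipe_order_alt
  rw [PySem.List.pyRange_one_eq_nil (by omega : n ≤ 0)]
  have : n.toNat = 0 := by omega
  rw [this]
  rfl

-- ===== VERDICT (by name: the statements are the Claim_ definitions above) =====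
theorem organ_pipe_order_spec : Claim_unchanged_organ_pipe_order := by
  intro n _ hnd
  unfold D_organ_pipe_order at hnd
  by_cases hn : 0 ≤ n
  · rw [a_eq_map n hn, alt_eq_map n hn]
  · have hmod : PySem.Int.mod n 2 = 0 := by
      rcases PySem.Int.mod_two_eq n with h | h
      · exact h
      · exfalso; apply hnd
        have hdm := PySem.Int.floordiv_mul_add_mod n 2
        constructor
        · omega
        · omega
    rw [a_neg n (by omega), alt_neg n (by omega), hmod]
    simp

theorem organ_pipe_order_changed : Claim_changed_organ_pipe_order := by
  unfold Claim_changed_organ_pipe_order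
  refine ⟨by decide, by decide, ?_, ?_, by decide⟩
  · rw [show pvDiffWitness_organ_pipe_order = (-1 : Int) from rfl,
        a_neg (-1) (by omega)]
    decide
  · rw [show pvDiffWitness_organ_pipe_order = (-1 : Int) from rfl,
        alt_neg (-1) (by omega)]
    rfl

theorem organ_pipe_order_tight : Claim_exact_organ_pipe_order := by
  intro n _ hd
  obtain ⟨hn, hm⟩ := hd
  have hmod : PySem.Int.mod n 2 = 1 := by
    rcases PySem.Int.mod_two_eq n with h | h
    · exfalso
      have hdm := PySem.Int.floordiv_mul_add_mod n 2
      omega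
    · exact h
  rw [a_neg n hn, alt_neg n hn, hmod]
  simp
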